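-- pv_equiv track=rewrite | github.com/georgericardo26/python_algorithm | strings_construction.py | string_construction
-- ===== SOURCE A (Python) =====
-- def string_construction(a, b):
--     combinate = ""
--     words = 0
--     size_word = len(a)
--
--     for s in b:
--         combinate += s
--         if sorted(combinate) == sorted(a):
--             words += 1
--             combinate = ""
--         else:
--             if len(combinate) == size_word:
--                 combinate = ""
--
--     return words
-- ===== SOURCE B (Python) =====
-- def string_construction(a, b):
--     k = len(a)
--     if k == 0:
--         return 0
--     target = {}
--     for c in a:
--         target[c] = target.get(c, 0) + 1
--     words = 0
--     for i in range(0, len(b) - k + 1, k):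
--         cnt = {}
--         for c in b[i:i + k]:
--             cnt[c] = cnt.get(c, 0) + 1
--         if all(cnt.get(c, 0) == target[c] for c in target):
--             words += 1
--     return words
-- ===== Notes on version B (the rewrite author's own statement) =====
-- stated objective: faster
-- what changed: Instead of growing a buffer character by character and re-sorting it (and a) at every character, B builds one frequency map of a and scans b in fixed-size strides, comparing block frequency counts against it.
import Mathlib
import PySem

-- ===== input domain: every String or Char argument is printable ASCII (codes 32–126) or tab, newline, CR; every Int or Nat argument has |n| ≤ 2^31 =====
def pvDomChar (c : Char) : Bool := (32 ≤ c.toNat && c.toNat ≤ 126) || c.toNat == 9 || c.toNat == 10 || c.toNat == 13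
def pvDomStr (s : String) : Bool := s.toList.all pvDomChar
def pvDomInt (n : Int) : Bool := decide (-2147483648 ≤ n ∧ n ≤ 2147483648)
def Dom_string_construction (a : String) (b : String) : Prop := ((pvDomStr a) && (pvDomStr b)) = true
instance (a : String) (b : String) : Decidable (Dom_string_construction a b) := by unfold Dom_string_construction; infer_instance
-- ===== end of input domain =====

-- B replaces A's per-character re-sorting of a growing buffer by one precomputed
-- frequency map of `a` and a fixed-stride scan of `b`'s blocks (objective: faster).


-- ===== PORT A =====
-- loop body of A's `for s in b`, on the state (combinate, words)
def scStepA (al : List Char) (st : List Char × Int) (s : Char) : List Char × Int :=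
  let combinate := st.1 ++ [s]
  if PySem.List.sorted combinate (fun c => c) false = PySem.List.sorted al (fun c => c) false then
    ([], st.2 + 1)
  else if (combinate.length : Int) = (al.length : Int) then ([], st.2)
  else (combinate, st.2)

def string_construction (a : String) (b : String) : Int :=
  (b.toList.foldl (scStepA a.toList) (([] : List Char), (0 : Int))).2

-- ===== PORT B =====
-- B's loop body: count the block b[i:i+k], compare with `target` on target's keys
def scStepB (target : PySem.Dict Char Int) (bl : List Char) (k : Int) (words : Int) (i : Int) : Int :=
  let block := PySem.List.slice bl (some i) (some (i + k))
  let cnt := block.foldl (fun d c => d.insert c (d.getD c 0 + 1)) (PySem.Dict.empty : PySem.Dict Char Int)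
  if target.keys.all (fun c => cnt.getD c 0 == target.getD c 0) then words + 1 else words

def string_construction_alt (a : String) (b : String) : Int :=
  let k := PySem.Str.len a
  if k = 0 then 0
  else
    let target := a.toList.foldl (fun d c => d.insert c (d.getD c 0 + 1)) (PySem.Dict.empty : PySem.Dict Char Int)
    (PySem.List.pyRange 0 (PySem.Str.len b - k + 1) k).foldl (scStepB target b.toList k) 0

-- ===== PRECONDITION & SPEC =====
def Spec_string_construction (a : String) (b : String) (out : Int) : Prop := out = string_construction_alt a b
instance (a : String) (b : String) (out : Int) : Decidable (Spec_string_construction a b out) := by unfold Spec_string_construction; infer_instance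

-- ===== CLAIM (what is proved, stated in full; the proofs are below) =====
def Claim_equal_string_construction : Prop := ∀ (a : String) (b : String), Dom_string_construction a b → Spec_string_construction a b (string_construction a b)

-- ===== LEMMAS AND PROOFS =====

-- reference block counter: number of full length-|al| chunks of l that sort like al
def scChunk (al : List Char) (l : List Char) : Int :=
  if h : al.length = 0 ∨ l.length < al.length then 0
  else
    (if PySem.List.sorted (l.take al.length) (fun c => c) false
        = PySem.List.sorted al (fun c => c) false then 1 else 0)
    + scChunk al (l.drop al.length)
termination_by l.length
decreasing_by simp only [List.length_drop]; omega

-- A's loop does nothing while the buffer stays shorter than |al|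
theorem scStepA_partial (al : List Char) :
    ∀ (l pre : List Char) (w : Int), (al.length = 0 ∨ pre.length + l.length < al.length) →
      l.foldl (scStepA al) (pre, w) = (pre ++ l, w) := by
  intro l
  induction l with
  | nil => intro pre w _; simp
  | cons c t ih =>
    intro pre w h
    have hneq : pre.length + 1 ≠ al.length := by
      rcases h with h0 | hlt
      · omega
      · simp only [List.length_cons] at hlt; omega
    have hne : PySem.List.sorted (pre ++ [c]) (fun x => x) false
        ≠ PySem.List.sorted al (fun x => x) false := by
      intro he
      have hl := congrArg List.length he
      simp only [PySem.List.length_sorted, List.length_append, List.length_singleton] at hl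
      exact hneq hl
    have hlen : ¬ (((pre ++ [c]).length : Int) = (al.length : Int)) := by
      simp only [List.length_append, List.length_singleton]
      exact_mod_cast fun hh => hneq (by exact_mod_cast hh)
    simp only [List.foldl_cons]
    have hstep : scStepA al (pre, w) c = (pre ++ [c], w) := by
      simp only [scStepA, hne, if_false]
      rw [if_neg hlen]
    rw [hstep, ih (pre ++ [c]) w ?_]
    · simp
    · rcases h with h0 | hlt
      · exact Or.inl h0
      · right
        simp only [List.length_append, List.length_singleton]
        simp only [List.length_cons] at hlt
        omega

-- one full chunk resets the buffer and adds the anagram test's value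
theorem scStepA_chunk (al chunk : List Char) (w : Int)
    (hk : 0 < al.length) (hlen : chunk.length = al.length) :
    chunk.foldl (scStepA al) (([] : List Char), w)
      = ([], w + (if PySem.List.sorted chunk (fun c => c) false
                     = PySem.List.sorted al (fun c => c) false then 1 else 0)) := by
  have hcne : chunk ≠ [] := by intro h; subst h; simp at hlen; omega
  obtain ⟨ys, y, rfl⟩ := (List.eq_nil_or_concat (chunk)).resolve_left hcne
  simp only [List.concat_eq_append] at *
  rw [List.foldl_append]
  rw [scStepA_partial al ys [] w (by right; simp only [List.length_append, List.length_singleton] at hlen; simp; omega)]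
  simp only [List.nil_append, List.foldl_cons, List.foldl_nil]
  by_cases hs : PySem.List.sorted (ys ++ [y]) (fun c => c) false = PySem.List.sorted al (fun c => c) false
  · simp [scStepA, hs]
  · simp [scStepA, hs]
    simp only [List.length_append, List.length_singleton] at hlen
    omega

-- A's whole loop counts the anagram chunks
theorem scA_main (al : List Char) (hk : 0 < al.length) :
    ∀ (l : List Char) (w : Int), (l.foldl (scStepA al) (([] : List Char), w)).2 = w + scChunk al l := by
  intro l
  induction hn : l.length using Nat.strong_induction_on generalizing l with
  | _ n ih =>
  intro w
  by_cases hlt : l.length < al.length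
  · rw [scStepA_partial al l [] w (Or.inr (by simpa using hlt))]
    rw [scChunk, dif_pos (Or.inr hlt)]
    simp
  · have hle : al.length ≤ l.length := Nat.le_of_not_lt hlt
    conv_lhs => rw [← List.take_append_drop al.length l]
    rw [List.foldl_append]
    rw [scStepA_chunk al (l.take al.length) w hk (by simp [List.length_take]; omega)]
    rw [ih (l.drop al.length).length (by subst hn; simp only [List.length_drop]; omega) _ rfl]
    nth_rewrite 2 [scChunk]
    rw [dif_neg (by omega)]
    rw [add_assoc]

-- equal counts on al's characters + equal lengths force a permutation
theorem perm_of_count_on (al bl : List Char) (h : bl.length = al.length)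
    (hc : ∀ c ∈ al, bl.count c = al.count c) : bl.Perm al := by
  have hg : (bl.filter (fun c => decide (c ∈ al))).Perm al := by
    rw [List.perm_iff_count]
    intro c
    by_cases hm : c ∈ al
    · rw [List.count_filter (by simp [hm])]
      exact hc c hm
    · rw [List.count_eq_zero.mpr (by simp [hm]), List.count_eq_zero.mpr hm]
  have hsub : (bl.filter (fun c => decide (c ∈ al))).Sublist bl := List.filter_sublist
  have hlen : (bl.filter (fun c => decide (c ∈ al))).length = bl.length := by
    rw [hg.length_eq, h]
  rw [hsub.eq_of_length hlen] at hg
  exact hg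

theorem perm_iff_sorted_eq (al bl : List Char) :
    bl.Perm al ↔ PySem.List.sorted bl (fun c => c) false = PySem.List.sorted al (fun c => c) false := by
  constructor
  · intro hp
    exact PySem.List.sorted_id_eq_of_perm_of_pairwise bl (PySem.List.sorted al (fun c => c) false)
      ((PySem.List.sorted_perm al (fun c => c) false).trans hp.symm)
      (PySem.List.sorted_pairwise al (fun c => c))
  · intro he
    have h1 := (PySem.List.sorted_perm bl (fun c => c) false).symm
    rw [he] at h1
    exact h1.trans (PySem.List.sorted_perm al (fun c => c) false)

-- B's frequency test ⇔ A's sorted test, on equal-length blocks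
theorem count_all_iff (al bl : List Char) (h : bl.length = al.length) :
    ((PySem.Set.ofList al).all
        (fun c => ((bl.count c : Int)) == ((al.count c : Int))) = true)
      ↔ PySem.List.sorted bl (fun c => c) false = PySem.List.sorted al (fun c => c) false := by
  rw [← perm_iff_sorted_eq]
  rw [List.all_eq_true]
  constructor
  · intro hall
    refine perm_of_count_on al bl h ?_
    intro c hm
    have := hall c ((PySem.Set.mem_ofList al c).mpr hm)
    have h2 : (bl.count c : Int) = (al.count c : Int) := by simpa using this
    exact_mod_cast h2
  · intro hp c hm
    have := (List.perm_iff_count.mp hp) c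
    simp [this]

-- B's stride loop counts the anagram chunks
theorem scB_main (al : List Char) (hk : 0 < al.length) :
    ∀ (l : List Char) (w : Int),
      (List.range (l.length / al.length)).foldl
        (fun words j => if PySem.List.sorted ((l.drop (al.length * j)).take al.length) (fun c => c) false
                           = PySem.List.sorted al (fun c => c) false then words + 1 else words) w
        = w + scChunk al l := by
  intro l
  induction hn : l.length using Nat.strong_induction_on generalizing l with
  | _ n ih =>
  intro w
  subst hn
  by_cases hlt : l.length < al.length
  · rw [Nat.div_eq_of_lt hlt]
    rw [scChunk, dif_pos (Or.inr hlt)]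
    simp
  · have hle : al.length ≤ l.length := Nat.le_of_not_lt hlt
    rw [Nat.div_eq_sub_div hk hle, List.range_succ_eq_map, List.foldl_cons, List.foldl_map]
    have hdrop : ∀ j : Nat, l.drop (al.length * (j + 1)) = (l.drop al.length).drop (al.length * j) := by
      intro j
      rw [List.drop_drop]
      ring_nf
    have hbody : ∀ (words : Int) (j : Nat),
        (if PySem.List.sorted ((l.drop (al.length * (j + 1))).take al.length) (fun c => c) false
            = PySem.List.sorted al (fun c => c) false then words + 1 else words)
        = (if PySem.List.sorted (((l.drop al.length).drop (al.length * j)).take al.length) (fun c => c) false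
            = PySem.List.sorted al (fun c => c) false then words + 1 else words) := by
      intro words j; rw [hdrop j]
    have hrw : (List.range ((l.length - al.length) / al.length)).foldl
        (fun words j => if PySem.List.sorted ((l.drop (al.length * (j + 1))).take al.length) (fun c => c) false
            = PySem.List.sorted al (fun c => c) false then words + 1 else words)
        (if PySem.List.sorted ((l.drop (al.length * 0)).take al.length) (fun c => c) false
            = PySem.List.sorted al (fun c => c) false then w + 1 else w)
        = w + scChunk al l := by
      rw [PySem.List.foldl_congr_mem _ _
        (fun words j =>
          if PySem.List.sorted (((l.drop al.length).drop (al.length * j)).take al.length) (fun c => c) false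
              = PySem.List.sorted al (fun c => c) false then words + 1 else words)
        _ (fun words j _ => hbody words j)]
      rw [← List.length_drop (i := al.length) (l := l)]
      rw [ih (l.drop al.length).length (by simp only [List.length_drop]; omega) _ rfl]
      simp only [Nat.mul_zero, List.drop_zero]
      nth_rewrite 2 [scChunk]
      rw [dif_neg (by omega)]
      split_ifs <;> ring
    exact hrw

-- range(0, n-k+1, k) enumerates the block starts k*j, j < n/k
theorem range_blocks (n k : Nat) (hk : 0 < k) :
    PySem.List.pyRange 0 ((n : Int) - (k : Int) + 1) (k : Int)
      = (List.range (n / k)).map (fun j => ((k * j : Nat) : Int)) := by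
  rw [PySem.List.pyRange_of_pos _ _ (by exact_mod_cast hk)]
  have hif : (if (0 : Int) < (n : Int) - (k : Int) + 1
      then ((((n : Int) - (k : Int) + 1) - 0 + (k : Int) - 1) / (k : Int)).toNat else 0) = n / k := by
    by_cases hle : k ≤ n
    · rw [if_pos (by omega)]
      have he : (((n : Int) - (k : Int) + 1) - 0 + (k : Int) - 1) = (n : Int) := by ring
      rw [he]
      exact_mod_cast rfl
    · rw [if_neg (by omega), Nat.div_eq_of_lt (by omega)]
  rw [hif]
  apply List.map_congr_left
  intro j _
  push_cast
  ring

-- B's loop body at block start k*j is exactly the sorted-block test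
theorem scStepB_eq (al bl : List Char) (hk : 0 < al.length) (j : Nat)
    (hj : j < bl.length / al.length) (words : Int) :
    scStepB (al.foldl (fun d c => d.insert c (d.getD c 0 + 1)) PySem.Dict.empty) bl
        (al.length : Int) words ((al.length * j : Nat) : Int)
      = if PySem.List.sorted ((bl.drop (al.length * j)).take al.length) (fun c => c) false
            = PySem.List.sorted al (fun c => c) false then words + 1 else words := by
  have hblock : PySem.List.slice bl (some ((al.length * j : Nat) : Int))
      (some (((al.length * j : Nat) : Int) + (al.length : Int)))
      = (bl.drop (al.length * j)).take al.length := by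
    rw [show (((al.length * j : Nat) : Int) + (al.length : Int)) = ((al.length * j + al.length : Nat) : Int) from by push_cast; ring]
    rw [PySem.List.slice_natCast]
    congr 1
    omega
  have hcnt : ∀ (bl' : List Char) (c : Char),
      ((bl'.foldl (fun d c => d.insert c (d.getD c 0 + 1)) (PySem.Dict.empty : PySem.Dict Char Int)).getD c 0)
        = (bl'.count c : Int) := by
    intro bl' c
    rw [PySem.Dict.getD_foldl_insert_add_one]
    simp
  have hkeys : (al.foldl (fun d c => d.insert c (d.getD c 0 + 1)) (PySem.Dict.empty : PySem.Dict Char Int)).keys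
      = PySem.Set.ofList al := by
    rw [PySem.Dict.keys_foldl_insert]
    rfl
  have hlenblk : ((bl.drop (al.length * j)).take al.length).length = al.length := by
    have h1 := (Nat.le_div_iff_mul_le hk).mp hj
    have h2 : (j + 1) * al.length = al.length * j + al.length := by ring
    rw [h2] at h1
    simp only [List.length_take, List.length_drop]
    omega
  simp only [scStepB, hblock, hkeys, hcnt]
  by_cases hs : PySem.List.sorted ((bl.drop (al.length * j)).take al.length) (fun c => c) false
      = PySem.List.sorted al (fun c => c) false
  · rw [if_pos ((count_all_iff al _ hlenblk).mpr hs), if_pos hs]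
  · rw [if_neg (fun h => hs ((count_all_iff al _ hlenblk).mp h)), if_neg hs]

-- ===== VERDICT (by name: the statement is the Claim_ definition above) =====
theorem string_construction_spec : Claim_equal_string_construction := by
  intro a b _
  unfold Spec_string_construction
  simp only [string_construction, string_construction_alt, PySem.Str.len_eq]
  by_cases h0 : a.toList.length = 0
  · rw [if_pos (by exact_mod_cast h0)]
    rw [scStepA_partial a.toList b.toList [] 0 (Or.inl h0)]
  · have hk : 0 < a.toList.length := Nat.pos_of_ne_zero h0
    rw [if_neg (by exact_mod_cast h0)]
    rw [range_blocks b.toList.length a.toList.length hk, List.foldl_map]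
    rw [PySem.List.foldl_congr_mem _ _
      (fun words j =>
        if PySem.List.sorted ((b.toList.drop (a.toList.length * j)).take a.toList.length) (fun c => c) false
            = PySem.List.sorted a.toList (fun c => c) false then words + 1 else words)
      _ (fun words j hj => scStepB_eq a.toList b.toList hk j (List.mem_range.mp hj) words)]
    rw [scB_main a.toList hk b.toList 0, scA_main a.toList hk b.toList 0]
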